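-- pv_equiv track=rewrite | github.com/Rickym270/rickym270.github.io | data/projects/InterviewStudying/MetaPreparation/ElementSwapping/ElementSwapping.py | getTotalTime
-- ===== SOURCE A (Python) =====
-- def getTotalTime(arr):
--     # TODO: Return highest possible penalty for a given output
--     # [4, 2, 1, 3]
--     # TODO: Take adventage of soritng properties
--     arr = sorted(arr, reverse=True)
--     # [4, 3, 2, 1] => [4, 7, 2, 1] => [4, 7, 9, 1] => [4, 7, 9, 10]
--     # TODO: Reference the size of the array with a variable
--     n = len(arr)
--     # TODO: Account for base case
--     if n == 1:
--         return arr[0]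
--
--     # TODO: Iterate from n
--     for i in range(n):
--         # TODO: Check if i < n - 1
--         if i < n-1:
--             arr[i+1] = arr[i] + arr[i+1]
--
--     return sum(arr[1:])
-- ===== SOURCE B (Python) =====
-- def getTotalTime(arr):
--     # one pass with closed-form rank weights instead of building prefix sums
--     arr = sorted(arr, reverse=True)
--     n = len(arr)
--     if n == 1:
--         return arr[0]
--     total = 0
--     for i, x in enumerate(arr):
--         total += x * (n - max(i, 1))
--     return total
-- ===== Notes on version B (the rewrite author's own statement) =====
-- stated objective: alternative
-- what changed: Instead of mutating the sorted list into running prefix sums and summing its tail, B computes the answer in one pass as a rank-weighted sum: each sorted element x at index i contributes x*(n - max(i,1)).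
import Mathlib
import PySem

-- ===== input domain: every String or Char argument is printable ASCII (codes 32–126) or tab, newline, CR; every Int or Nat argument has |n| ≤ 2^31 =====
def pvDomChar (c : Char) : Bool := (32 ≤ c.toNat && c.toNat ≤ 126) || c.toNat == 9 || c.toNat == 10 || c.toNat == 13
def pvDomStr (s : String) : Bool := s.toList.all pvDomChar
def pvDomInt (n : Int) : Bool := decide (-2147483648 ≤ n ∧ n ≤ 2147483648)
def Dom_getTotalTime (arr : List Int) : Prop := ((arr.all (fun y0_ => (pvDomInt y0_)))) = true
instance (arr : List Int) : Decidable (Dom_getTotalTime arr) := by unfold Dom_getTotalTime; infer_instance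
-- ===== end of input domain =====

-- B replaces A's in-place prefix-sum mutation of the sorted list by a single pass
-- computing the rank-weighted sum x*(n - max(i,1)); same value, similar cost ("alternative").

-- ===== PORT A =====
-- A: sort descending, turn the list into running prefix sums in place, return sum of the tail.
def getTotalTime (arr : List Int) : Int :=
  let arr1 := PySem.List.sorted arr (fun x => x) true
  let n : Int := arr1.length
  if n = 1 then PySem.List.pyGetD arr1 0 0
  else
    let arr2 := (PySem.List.pyRange 0 n 1).foldl
      (fun xs i =>
        if i < n - 1 then
          PySem.List.pySetD xs (i + 1) (PySem.List.pyGetD xs i 0 + PySem.List.pyGetD xs (i + 1) 0)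
        else xs) arr1
    (PySem.List.slice arr2 (some 1) none).sum

-- ===== PORT B =====
-- B: sort descending, one pass over enumerate with closed-form weight n - max(i,1).
def getTotalTime_alt (arr : List Int) : Int :=
  let arr1 := PySem.List.sorted arr (fun x => x) true
  let n : Int := arr1.length
  if n = 1 then PySem.List.pyGetD arr1 0 0
  else (PySem.List.enumerate arr1 0).foldl (fun tot p => tot + p.2 * (n - max p.1 1)) 0

-- ===== PRECONDITION & SPEC =====
def Spec_getTotalTime (arr : List Int) (out : Int) : Prop := out = getTotalTime_alt arr
instance (arr : List Int) (out : Int) : Decidable (Spec_getTotalTime arr out) := by unfold Spec_getTotalTime; infer_instance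

-- ===== CLAIM (what is proved, stated in full; the proofs are below) =====
def Claim_equal_getTotalTime : Prop := ∀ (arr : List Int), Dom_getTotalTime arr → Spec_getTotalTime arr (getTotalTime arr)

-- ===== LEMMAS AND PROOFS =====

-- the prefix-sum list A's loop produces, as a structural recursion
def pvGfun : List Int → List Int
  | [] => []
  | [a] => [a]
  | a :: b :: t => a :: pvGfun ((a + b) :: t)
termination_by l => l.length

-- A's loop body, at the Nat-index level
def pvStepN (m : Nat) (xs : List Int) (k : Nat) : List Int :=
  if (k : Int) < (m : Int) - 1 then xs.set (k + 1) (xs.getD k 0 + xs.getD (k + 1) 0) else xs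

def pvLoopN (s : List Int) : List Int := (List.range s.length).foldl (pvStepN s.length) s

-- B's weighted sum of a suffix: each element weighted by the length of the suffix it heads
def pvW : List Int → Int
  | [] => 0
  | x :: l => x * ((l.length : Int) + 1) + pvW l

theorem pv_shiftN (L : List Nat) (m : Nat) (a : Int) :
    ∀ ys : List Int, (L.map Nat.succ).foldl (pvStepN (m + 1)) (a :: ys) = a :: L.foldl (pvStepN m) ys := by
  induction L with
  | nil => intro ys; simp
  | cons k L ih =>
    intro ys
    simp only [List.map_cons, List.foldl_cons]
    have hstep : pvStepN (m + 1) (a :: ys) (Nat.succ k) = a :: pvStepN m ys k := by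
      unfold pvStepN
      by_cases h : (k : Int) < (m : Int) - 1
      · have h' : ((Nat.succ k : Nat) : Int) < ((m + 1 : Nat) : Int) - 1 := by push_cast; push_cast at h; omega
        rw [if_pos h', if_pos h]
        simp [List.getD]
      · have h' : ¬ ((Nat.succ k : Nat) : Int) < ((m + 1 : Nat) : Int) - 1 := by push_cast; push_cast at h; omega
        rw [if_neg h', if_neg h]
    rw [hstep, ih]

theorem pvLoopN_cons (a b : Int) (t : List Int) :
    pvLoopN (a :: b :: t) = a :: pvLoopN ((a + b) :: t) := by
  unfold pvLoopN
  have hlen : (a :: b :: t).length = (t.length + 1) + 1 := by simp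
  rw [hlen, List.range_succ_eq_map]
  simp only [List.foldl_cons]
  have h0 : pvStepN (t.length + 1 + 1) (a :: b :: t) 0 = a :: (a + b) :: t := by
    unfold pvStepN
    have h : ((0 : Nat) : Int) < ((t.length + 1 + 1 : Nat) : Int) - 1 := by push_cast; omega
    rw [if_pos h]
    simp [List.getD]
  rw [h0, pv_shiftN]
  simp

theorem pvLoopN_eq_gfun : ∀ (t : List Int) (x : Int), pvLoopN (x :: t) = pvGfun (x :: t) := by
  intro t
  induction t with
  | nil =>
    intro x
    unfold pvLoopN
    simp [List.range_succ, pvStepN, pvGfun]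
  | cons b t ih =>
    intro x
    rw [pvLoopN_cons, ih]; simp only [pvGfun]

theorem pv_sum_gfun : ∀ (t : List Int) (x : Int),
    (pvGfun (x :: t)).sum = x * ((t.length : Int) + 1) + pvW t := by
  intro t
  induction t with
  | nil => intro x; simp [pvGfun, pvW]
  | cons b t ih =>
    intro x
    simp only [pvGfun, List.sum_cons]
    rw [ih (x + b)]
    simp only [pvW, List.length_cons]
    push_cast
    ring

theorem pv_enum_foldl (n : Int) : ∀ (l : List Int) (s0 tot : Int), 1 ≤ s0 → n = s0 + l.length →
    (PySem.List.enumerate l s0).foldl (fun tot p => tot + p.2 * (n - max p.1 1)) tot = tot + pvW l := by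
  intro l
  induction l with
  | nil => intro s0 tot _ _; simp [PySem.List.enumerate_nil, pvW]
  | cons x l ih =>
    intro s0 tot hs0 hn
    rw [PySem.List.enumerate_cons]
    simp only [List.foldl_cons]
    simp only [List.length_cons] at hn
    push_cast at hn
    rw [ih (s0 + 1) _ (by omega) (by omega)]
    simp only [pvW]
    have hmax : max s0 1 = s0 := by omega
    have hlen : n - s0 = (l.length : Int) + 1 := by omega
    rw [hmax, hlen]
    ring

-- bridge: A's Int-indexed pyRange loop is pvLoopN on the same list
theorem pv_loop_bridge (s : List Int) :
    (PySem.List.pyRange 0 (s.length : Int) 1).foldl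
      (fun xs i =>
        if i < (s.length : Int) - 1 then
          PySem.List.pySetD xs (i + 1) (PySem.List.pyGetD xs i 0 + PySem.List.pyGetD xs (i + 1) 0)
        else xs) s = pvLoopN s := by
  rw [PySem.List.pyRange_one]
  simp only [Int.sub_zero, Int.toNat_natCast, List.foldl_map]
  unfold pvLoopN
  have hf : (fun (xs : List Int) (k : Nat) =>
      if ((0 : Int) + (k : Int)) < (s.length : Int) - 1 then
        PySem.List.pySetD xs (((0 : Int) + (k : Int)) + 1)
          (PySem.List.pyGetD xs ((0 : Int) + (k : Int)) 0 + PySem.List.pyGetD xs (((0 : Int) + (k : Int)) + 1) 0)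
      else xs) = pvStepN s.length := by
    funext xs k
    have hc : ((0 : Int) + (k : Int)) = ((k : Nat) : Int) := by ring
    rw [hc]
    unfold pvStepN
    by_cases h : ((k : Nat) : Int) < (s.length : Int) - 1
    · have h1 : ((k : Nat) : Int) + 1 = (((k + 1 : Nat)) : Int) := by push_cast; ring
      rw [if_pos h, if_pos h, h1, PySem.List.pySetD_natCast]
      simp only [PySem.List.pyGetD_natCast]
    · rw [if_neg h, if_neg h]
  rw [hf]

-- ===== VERDICT (by name: the statement is the Claim_ definition above) =====
theorem getTotalTime_spec : Claim_equal_getTotalTime := by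
  intro arr _
  unfold Spec_getTotalTime getTotalTime getTotalTime_alt
  set s := PySem.List.sorted arr (fun x => x) true with hs
  clear_value s
  simp only []
  by_cases h1 : (s.length : Int) = 1
  · simp [h1]
  · simp only [h1, if_false]
    rw [pv_loop_bridge s, PySem.List.slice_from_one]
    match s, h1 with
    | [], _ => simp [pvLoopN, PySem.List.enumerate_nil]
    | [a], h1 => exact absurd (by simp) h1
    | a :: b :: t, _ =>
      rw [pvLoopN_eq_gfun]
      simp only [pvGfun, List.tail_cons]
      rw [pv_sum_gfun]
      simp only [PySem.List.enumerate_cons, List.foldl_cons]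
      rw [pv_enum_foldl (((a :: b :: t).length : Nat) : Int) t (0 + 1 + 1) _ (by omega)
        (by simp only [List.length_cons]; push_cast; ring)]
      have h0 : max (0 : Int) 1 = 1 := by omega
      have hm1 : max ((0 : Int) + 1) 1 = 1 := by omega
      rw [h0, hm1]
      simp only [List.length_cons]
      push_cast
      ring
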